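-- pv_equiv track=rewrite | github.com/shahsarkar3112/numerology_apk | main.py | calculate_chaldean
-- ===== SOURCE A (Python) =====
-- def calculate_chaldean(name):
--     chart = {
--         'A': 1, 'I': 1, 'J': 1, 'Q': 1, 'Y': 1, 'B': 2, 'K': 2, 'R': 2,
--         'C': 3, 'G': 3, 'L': 3, 'S': 3, 'D': 4, 'M': 4, 'T': 4,
--         'E': 5, 'H': 5, 'N': 5, 'X': 5, 'U': 6, 'V': 6, 'W': 6,
--         'O': 7, 'Z': 7, 'F': 8, 'P': 8
--     }
--     total = sum(chart.get(char, 0) for char in name.upper() if char.isalpha())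
--
--     def reduce_digit(n):
--         while n > 9:
--             n = sum(int(digit) for digit in str(n))
--         return n if n > 0 else 0
--
--     return total, reduce_digit(total)
-- ===== SOURCE B (Python) =====
-- _VALS = (1, 2, 3, 4, 5, 8, 3, 5, 1, 1, 2, 3, 4, 5, 7, 8, 1, 2, 3, 4, 6, 6, 6, 5, 1, 7)
--
-- def calculate_chaldean(name):
--     total = 0
--     for ch in name:
--         o = ord(ch)
--         if 97 <= o <= 122:
--             o -= 32
--         if 65 <= o <= 90:
--             total += _VALS[o - 65]
--     return total, (0 if total == 0 else 1 + (total - 1) % 9)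
-- ===== Notes on version B (the rewrite author's own statement) =====
-- stated objective: alternative
-- what changed: Replaces the dict lookup with a 26-entry value table indexed by character code with explicit case folding, and replaces the iterative repeated digit-summation (str/int round-trips in a while loop) with the closed-form digital root 1 + (total - 1) % 9.
import Mathlib
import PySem

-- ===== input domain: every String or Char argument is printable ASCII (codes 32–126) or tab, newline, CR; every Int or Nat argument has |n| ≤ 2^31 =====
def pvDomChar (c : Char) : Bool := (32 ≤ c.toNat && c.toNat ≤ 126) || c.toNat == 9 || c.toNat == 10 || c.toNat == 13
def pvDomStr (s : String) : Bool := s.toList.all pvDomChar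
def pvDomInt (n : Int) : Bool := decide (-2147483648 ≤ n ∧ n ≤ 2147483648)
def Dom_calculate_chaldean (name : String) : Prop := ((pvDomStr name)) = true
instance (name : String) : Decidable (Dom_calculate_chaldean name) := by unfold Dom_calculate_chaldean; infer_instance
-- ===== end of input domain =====

-- B replaces A's dict lookup by a 26-entry table indexed by character code (explicit case fold)
-- and A's while-loop repeated digit summation by the closed-form digital root 1 + (total-1) % 9.

-- ===== PORT A =====
-- the chart dict literal
def pvChart : PySem.Dict Char Int := PySem.Dict.ofList
  [('A',1),('I',1),('J',1),('Q',1),('Y',1),('B',2),('K',2),('R',2),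
   ('C',3),('G',3),('L',3),('S',3),('D',4),('M',4),('T',4),
   ('E',5),('H',5),('N',5),('X',5),('U',6),('V',6),('W',6),
   ('O',7),('Z',7),('F',8),('P',8)]

-- int(digit) for a single character of str(n); exact wherever reduce_digit reaches it
-- (there n > 9, so every character of str(n) is a decimal digit and int() cannot raise)
def pvIntOfDigitChar (c : Char) : Int := (PySem.Int.ofChars? [c]).getD 0

-- sum(int(digit) for digit in str(n))  (str(n) iterated character by character = PySem.Int.toChars n, by toList_toStr)
def pvDigitSumA (n : Int) : Int := ((PySem.Int.toChars n).map pvIntOfDigitChar).sum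

-- ---- lemmas cited by pvReduceDigit's decreasing_by (termination of A's while loop) ----
theorem pvToDigitsCore_eq (fuel : Nat) : ∀ (n : Nat) (ds : List Char), 0 < n → n < fuel →
    Nat.toDigitsCore 10 fuel n ds = ((Nat.digits 10 n).map Nat.digitChar).reverse ++ ds := by
  induction fuel with
  | zero => intro n ds h0 hf; omega
  | succ fuel ih =>
    intro n ds h0 _
    rw [Nat.toDigitsCore]
    by_cases h : n / 10 = 0
    · rw [if_pos h]
      rw [Nat.digits_def' (by norm_num : (1:Nat) < 10) h0, h]
      simp
    · rw [if_neg h]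
      rw [ih (n / 10) _ (Nat.pos_of_ne_zero h)
        (lt_of_lt_of_le (Nat.div_lt_self h0 (by norm_num)) (by omega))]
      rw [Nat.digits_def' (by norm_num : (1:Nat) < 10) h0]
      simp

theorem pvToChars_pos (n : Int) (h : 0 < n) :
    PySem.Int.toChars n = ((Nat.digits 10 n.toNat).map Nat.digitChar).reverse := by
  have h1 : ¬ n < 0 := by omega
  have h2 : 0 < n.toNat := by omega
  simp only [PySem.Int.toChars, if_neg h1, Nat.toDigits]
  rw [pvToDigitsCore_eq (n.toNat + 1) n.toNat [] h2 (by omega)]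
  simp

theorem pvIntOfDigitChar_digitChar (d : Nat) (hd : d < 10) :
    pvIntOfDigitChar (Nat.digitChar d) = (d : Int) := by
  interval_cases d <;> decide

theorem pvDigitSumA_eq (n : Int) (h : 0 < n) :
    pvDigitSumA n = ((Nat.digits 10 n.toNat).sum : Int) := by
  unfold pvDigitSumA
  rw [pvToChars_pos n h, List.map_reverse, List.sum_reverse, List.map_map,
      Nat.cast_list_sum]
  congr 1
  refine List.map_congr_left ?_
  intro d hd
  exact pvIntOfDigitChar_digitChar d (Nat.digits_lt_base (by norm_num) hd)

theorem pvDigitsSum_lt (m : Nat) (h : 10 ≤ m) : (Nat.digits 10 m).sum < m := by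
  rw [Nat.digits_def' (by norm_num : (1:Nat) < 10) (by omega)]
  have h1 := Nat.digit_sum_le 10 (m / 10)
  simp only [List.sum_cons]
  omega

theorem pvDigitSumA_lt (n : Int) (h : 9 < n) : (pvDigitSumA n).toNat < n.toNat := by
  rw [pvDigitSumA_eq n (by omega)]
  have := pvDigitsSum_lt n.toNat (by omega)
  omega
-- ---- end termination lemmas ----

-- def reduce_digit(n): while n > 9: n = sum(int(digit) for digit in str(n)); return n if n > 0 else 0
def pvReduceDigit (n : Int) : Int :=
  if h : 9 < n then pvReduceDigit (pvDigitSumA n)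
  else if 0 < n then n else 0
termination_by n.toNat
decreasing_by exact pvDigitSumA_lt n h

def calculate_chaldean (name : String) : Int × Int :=
  let total := (((PySem.Str.upper name).toList.filter
      (fun c => PySem.Chars.isalpha c)).map (fun c => pvChart.getD c 0)).sum
  (total, pvReduceDigit total)

-- ===== PORT B =====
def pvVals : List Int := [1, 2, 3, 4, 5, 8, 3, 5, 1, 1, 2, 3, 4, 5, 7, 8, 1, 2, 3, 4, 6, 6, 6, 5, 1, 7]

def calculate_chaldean_alt (name : String) : Int × Int :=
  let total := name.toList.foldl (fun total ch =>
      let o : Int := (ch.toNat : Int)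
      let o := if 97 ≤ o ∧ o ≤ 122 then o - 32 else o
      if 65 ≤ o ∧ o ≤ 90 then
        -- _VALS[o - 65]: the guard keeps the index in range, so tuple indexing cannot raise
        total + (PySem.List.pyGet? pvVals (o - 65)).getD 0
      else total) 0
  (total, if total = 0 then 0 else 1 + PySem.Int.mod (total - 1) 9)

-- ===== PRECONDITION & SPEC =====
def Spec_calculate_chaldean (name : String) (out : Int × Int) : Prop := out = calculate_chaldean_alt name
instance (name : String) (out : Int × Int) : Decidable (Spec_calculate_chaldean name out) := by unfold Spec_calculate_chaldean; infer_instance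

-- ===== CLAIM (what is proved, stated in full; the proofs are below) =====
def Claim_equal_calculate_chaldean : Prop := ∀ (name : String), Dom_calculate_chaldean name → Spec_calculate_chaldean name (calculate_chaldean name)

-- ===== LEMMAS AND PROOFS =====

-- A's per-character contribution (after uppercasing, A filters on isalpha and looks up the chart)
def pvAContrib (c : Char) : Int :=
  if PySem.Chars.isalpha (PySem.Chars.upperChar c) then pvChart.getD (PySem.Chars.upperChar c) 0 else 0

-- B's per-character contribution
def pvBContrib (c : Char) : Int :=
  let o : Int := (c.toNat : Int)
  let o := if 97 ≤ o ∧ o ≤ 122 then o - 32 else o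
  if 65 ≤ o ∧ o ≤ 90 then (PySem.List.pyGet? pvVals (o - 65)).getD 0 else 0

theorem pvA_total (l : List Char) :
    (((l.map PySem.Chars.upperChar).filter (fun c => PySem.Chars.isalpha c)).map
      (fun c => pvChart.getD c 0)).sum = (l.map pvAContrib).sum := by
  induction l with
  | nil => rfl
  | cons c l ih =>
    simp only [List.map_cons, List.filter_cons]
    by_cases h : PySem.Chars.isalpha (PySem.Chars.upperChar c)
    · simp [h, pvAContrib, ih]
    · simp [h, pvAContrib, ih]

theorem pvB_total (l : List Char) :
    l.foldl (fun total ch =>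
      let o : Int := (ch.toNat : Int)
      let o := if 97 ≤ o ∧ o ≤ 122 then o - 32 else o
      if 65 ≤ o ∧ o ≤ 90 then
        total + (PySem.List.pyGet? pvVals (o - 65)).getD 0
      else total) 0 = (l.map pvBContrib).sum := by
  have hbody : (fun (total : Int) (ch : Char) =>
      let o : Int := (ch.toNat : Int)
      let o := if 97 ≤ o ∧ o ≤ 122 then o - 32 else o
      if 65 ≤ o ∧ o ≤ 90 then
        total + (PySem.List.pyGet? pvVals (o - 65)).getD 0
      else total) = (fun total ch => total + pvBContrib ch) := by
    funext total ch
    simp only [pvBContrib]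
    split_ifs <;> simp
  rw [hbody, PySem.List.foldl_add]
  simp

-- on the domain's characters the two per-character contributions agree
set_option maxRecDepth 8192 in
theorem pvContrib_eq (c : Char) (h : pvDomChar c = true) : pvBContrib c = pvAContrib c := by
  have h127 : c.toNat < 127 := by
    simp only [pvDomChar, Bool.or_eq_true, Bool.and_eq_true, decide_eq_true_eq,
      beq_iff_eq] at h
    omega
  have hall : ((List.range 127).all
      (fun k => pvBContrib (Char.ofNat k) == pvAContrib (Char.ofNat k))) = true := by decide
  have := List.all_eq_true.mp hall c.toNat (List.mem_range.mpr h127)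
  rw [Char.ofNat_toNat] at this
  exact beq_iff_eq.mp this

set_option maxRecDepth 8192 in
theorem pvAContrib_nonneg (c : Char) (h127 : c.toNat < 127) : 0 ≤ pvAContrib c := by
  have hall : ((List.range 127).all
      (fun k => decide (0 ≤ pvAContrib (Char.ofNat k)))) = true := by decide
  have := List.all_eq_true.mp hall c.toNat (List.mem_range.mpr h127)
  rw [Char.ofNat_toNat] at this
  exact of_decide_eq_true this

-- A's reduce_digit in closed form: the digital root
theorem pvDigitsSum_pos (m : Nat) (h : 0 < m) : 0 < (Nat.digits 10 m).sum := by
  induction m using Nat.strong_induction_on with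
  | _ m ih =>
    rw [Nat.digits_def' (by norm_num : (1:Nat) < 10) h]
    simp only [List.sum_cons]
    by_cases hr : m % 10 = 0
    · have hq : 0 < m / 10 := by omega
      have := ih (m / 10) (Nat.div_lt_self h (by norm_num)) hq
      omega
    · omega

theorem pvDigitSumA_mod (n : Int) (h : 9 < n) : pvDigitSumA n % 9 = n % 9 := by
  rw [pvDigitSumA_eq n (by omega)]
  have hm : n.toNat % 9 = (Nat.digits 10 n.toNat).sum % 9 := Nat.modEq_nine_digits_sum n.toNat
  omega

theorem pvDigitSumA_pos (n : Int) (h : 9 < n) : 0 < pvDigitSumA n := by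
  rw [pvDigitSumA_eq n (by omega)]
  have := pvDigitsSum_pos n.toNat (by omega)
  omega

theorem pvReduce_closed_aux : ∀ (m : Nat) (n : Int), 0 ≤ n → n.toNat = m →
    pvReduceDigit n = if n = 0 then 0 else 1 + PySem.Int.mod (n - 1) 9 := by
  intro m
  induction m using Nat.strong_induction_on with
  | _ m ih =>
    intro n hn hm
    rw [pvReduceDigit]
    by_cases h : 9 < n
    · rw [dif_pos h]
      have hlt := pvDigitSumA_lt n h
      have hpos := pvDigitSumA_pos n h
      have hmod := pvDigitSumA_mod n h
      rw [ih (pvDigitSumA n).toNat (by omega) (pvDigitSumA n) (by omega) rfl]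
      rw [if_neg (by omega), if_neg (by omega : ¬ n = 0)]
      rw [PySem.Int.mod_eq_emod_of_pos (by norm_num), PySem.Int.mod_eq_emod_of_pos (by norm_num)]
      omega
    · rw [dif_neg h]
      by_cases h0 : 0 < n
      · rw [if_pos h0, if_neg (by omega : ¬ n = 0),
          PySem.Int.mod_eq_emod_of_pos (by norm_num)]
        omega
      · rw [if_neg h0, if_pos (by omega : n = 0)]

theorem pvReduce_closed (n : Int) (hn : 0 ≤ n) :
    pvReduceDigit n = if n = 0 then 0 else 1 + PySem.Int.mod (n - 1) 9 :=
  pvReduce_closed_aux n.toNat n hn rfl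

-- ===== VERDICT (by name: the statement is the Claim_ definition above) =====
theorem calculate_chaldean_spec : Claim_equal_calculate_chaldean := by
  intro name hdom
  unfold Spec_calculate_chaldean calculate_chaldean calculate_chaldean_alt
  have hchars : ∀ c ∈ name.toList, pvDomChar c = true :=
    List.all_eq_true.mp hdom
  have htot :
      (((PySem.Str.upper name).toList.filter
        (fun c => PySem.Chars.isalpha c)).map (fun c => pvChart.getD c 0)).sum
      = name.toList.foldl (fun total ch =>
          let o : Int := (ch.toNat : Int)
          let o := if 97 ≤ o ∧ o ≤ 122 then o - 32 else o
          if 65 ≤ o ∧ o ≤ 90 then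
            total + (PySem.List.pyGet? pvVals (o - 65)).getD 0
          else total) 0 := by
    rw [pvB_total, PySem.Str.toList_upper, PySem.Chars.upper, pvA_total]
    congr 1
    refine List.map_congr_left ?_
    intro c hc
    exact (pvContrib_eq c (hchars c hc)).symm
  simp only []
  rw [← htot]
  refine Prod.ext rfl ?_
  have hnn : 0 ≤ (((PySem.Str.upper name).toList.filter
      (fun c => PySem.Chars.isalpha c)).map (fun c => pvChart.getD c 0)).sum := by
    rw [PySem.Str.toList_upper, PySem.Chars.upper, pvA_total]
    refine List.sum_nonneg ?_
    intro x hx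
    obtain ⟨c, hc, rfl⟩ := List.mem_map.mp hx
    have hd := hchars c hc
    simp only [pvDomChar, Bool.or_eq_true, Bool.and_eq_true, decide_eq_true_eq,
      beq_iff_eq] at hd
    exact pvAContrib_nonneg c (by omega)
  exact pvReduce_closed _ hnn
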